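-- pv_equiv track=rewrite | github.com/JBKing514/AutoEhHunter | Docker/main/hunterAgent/skills/profile.py | _extract_source_urls
-- ===== SOURCE A (Python) =====
-- from typing import Any, Dict, List
--
-- def _extract_source_urls(tags: List[Any]) -> tuple[str, str]:
--     eh_url = ""
--     ex_url = ""
--     for tag in tags or []:
--         s = str(tag or "").strip()
--         if not s.lower().startswith("source:"):
--             continue
--         v = s.split(":", 1)[1].strip()
--         if not v:
--             continue
--         if not v.startswith("http://") and not v.startswith("https://"):
--             v = f"https://{v}"
--         if "exhentai.org" in v:
--             ex_url = ex_url or v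
--         elif "e-hentai.org" in v:
--             eh_url = eh_url or v
--     return eh_url, ex_url
-- ===== SOURCE B (Python) =====
-- def _parse_source_tag(tag):
--     s = str(tag or "").strip()
--     if not s.lower().startswith("source:"):
--         return None
--     v = s.split(":", 1)[1].strip()
--     if not v:
--         return None
--     return v if v.startswith(("http://", "https://")) else f"https://{v}"
--
-- def _extract_source_urls(tags):
--     urls = [u for u in map(_parse_source_tag, tags or []) if u is not None]
--     ex_url = next((u for u in urls if "exhentai.org" in u), "")
--     eh_url = next((u for u in urls if "e-hentai.org" in u and "exhentai.org" not in u), "")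
--     return eh_url, ex_url
-- ===== Notes on version B (the rewrite author's own statement) =====
-- stated objective: alternative
-- what changed: A's single loop that interleaves parsing with two mutable 'first match wins' accumulators is replaced by a parse pass building the list of normalised candidate URLs followed by two independent first-match selections (next/find over the candidates).
import Mathlib
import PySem

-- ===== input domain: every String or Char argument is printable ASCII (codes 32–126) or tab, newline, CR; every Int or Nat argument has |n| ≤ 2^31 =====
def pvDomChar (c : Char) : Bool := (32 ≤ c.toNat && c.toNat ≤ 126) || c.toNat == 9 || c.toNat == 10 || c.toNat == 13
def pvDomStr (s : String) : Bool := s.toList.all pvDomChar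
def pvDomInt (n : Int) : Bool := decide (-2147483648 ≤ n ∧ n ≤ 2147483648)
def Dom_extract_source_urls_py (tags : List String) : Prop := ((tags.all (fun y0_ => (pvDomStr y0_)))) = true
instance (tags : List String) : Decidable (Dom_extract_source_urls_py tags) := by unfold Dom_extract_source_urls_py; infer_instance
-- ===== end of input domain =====

-- B replaces A's single interleaved accumulator loop by a parse pass (candidate URLs) plus two
-- targeted first-match selections; objective: simpler decomposition, same cost.

-- ===== PORT A =====
-- loop body of A: one tag updates the (eh_url, ex_url) accumulator.
-- s.split(":", 1)[1] is ported with .getD 1 "": the index-1 piece always exists here, since the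
-- branch is only reached when s (case-insensitively) starts with "source:", so s contains ':'.
def pvStepA (st : String × String) (tag : String) : String × String :=
  let s := PySem.Str.strip tag
  if !(PySem.Str.startswith (PySem.Str.lower s) "source:") then st
  else
    let v0 := PySem.Str.strip (((PySem.Str.splitMax? s ":" 1).getD []).getD 1 "")
    if v0 = "" then st
    else
      let v := if !PySem.Str.startswith v0 "http://" && !PySem.Str.startswith v0 "https://"
               then "https://" ++ v0 else v0
      if PySem.Str.isIn "exhentai.org" v then (st.1, if st.2 = "" then v else st.2)
      else if PySem.Str.isIn "e-hentai.org" v then ((if st.1 = "" then v else st.1), st.2)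
      else st

def extract_source_urls_py (tags : List String) : String × String :=
  tags.foldl pvStepA ("", "")

-- ===== PORT B =====
-- parse one tag into its normalised candidate URL (none = skipped by the comprehension).
def pvParseSourceTag (tag : String) : Option String :=
  let s := PySem.Str.strip tag
  if !(PySem.Str.startswith (PySem.Str.lower s) "source:") then none
  else
    let v0 := PySem.Str.strip (((PySem.Str.splitMax? s ":" 1).getD []).getD 1 "")
    if v0 = "" then none
    else some (if !PySem.Str.startswith v0 "http://" && !PySem.Str.startswith v0 "https://"
               then "https://" ++ v0 else v0)

def extract_source_urls_py_alt (tags : List String) : String × String :=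
  let urls := (tags.map pvParseSourceTag).filterMap id
  let ex_url := (urls.find? (fun u => PySem.Str.isIn "exhentai.org" u)).getD ""
  let eh_url := (urls.find? (fun u =>
      PySem.Str.isIn "e-hentai.org" u && !PySem.Str.isIn "exhentai.org" u)).getD ""
  (eh_url, ex_url)

-- ===== PRECONDITION & SPEC =====
def Spec_extract_source_urls_py (tags : List String) (out : String × String) : Prop := out = extract_source_urls_py_alt tags
instance (tags : List String) (out : String × String) : Decidable (Spec_extract_source_urls_py tags out) := by unfold Spec_extract_source_urls_py; infer_instance

-- ===== CLAIM (what is proved, stated in full; the proofs are below) =====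
def Claim_equal_extract_source_urls_py : Prop := ∀ (tags : List String), Dom_extract_source_urls_py tags → Spec_extract_source_urls_py tags (extract_source_urls_py tags)

-- ===== LEMMAS AND PROOFS =====

-- "a or b" on Python strings (truthiness): b only if a is empty.
def pvOrD (a b : String) : String := if a = "" then b else a

def pvCand (tags : List String) : List String := (tags.map pvParseSourceTag).filterMap id

def pvExP (u : String) : Bool := PySem.Str.isIn "exhentai.org" u
def pvEhP (u : String) : Bool := PySem.Str.isIn "e-hentai.org" u && !PySem.Str.isIn "exhentai.org" u

lemma pvOrD_empty_left (b : String) : pvOrD "" b = b := by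
  simp [pvOrD]

lemma pvOrD_empty_right (a : String) : pvOrD a "" = a := by
  unfold pvOrD; split <;> simp_all

lemma pvOrD_absorb (a b c : String) (hb : b ≠ "") : pvOrD (pvOrD a b) c = pvOrD a b := by
  unfold pvOrD; split_ifs <;> simp_all

lemma pvParse_ne_empty (t v : String) (h : pvParseSourceTag t = some v) : v ≠ "" := by
  simp only [pvParseSourceTag] at h
  split_ifs at h with h1 h2 h3
  · rw [Option.some.injEq] at h
    intro hv
    have := congrArg String.length (h.trans hv)
    rw [String.length_append] at this
    simp at this
  · rw [Option.some.injEq] at h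
    intro hv
    exact h2 (h.trans hv)

lemma pvStep_parse_none (st : String × String) (t : String)
    (h : pvParseSourceTag t = none) : pvStepA st t = st := by
  simp only [pvParseSourceTag] at h
  simp only [pvStepA]
  split_ifs at h with h1 h2
  · rw [if_pos h1]
  · rw [if_neg h1, if_pos h2]

lemma pvStep_parse_some (st : String × String) (t v : String)
    (h : pvParseSourceTag t = some v) :
    pvStepA st t =
      if pvExP v then (st.1, pvOrD st.2 v)
      else if PySem.Str.isIn "e-hentai.org" v then (pvOrD st.1 v, st.2)
      else st := by
  simp only [pvParseSourceTag] at h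
  simp only [pvStepA, pvExP, pvOrD]
  split_ifs at h with h1 h2 h3
  · rw [if_neg h1, if_neg h2, if_pos h3]
    rw [Option.some.injEq] at h
    subst h
    rfl
  · rw [if_neg h1, if_neg h2, if_neg h3]
    rw [Option.some.injEq] at h
    subst h
    rfl

lemma pvLoop_char (tags : List String) : ∀ (st : String × String),
    tags.foldl pvStepA st =
      (pvOrD st.1 (((pvCand tags).find? pvEhP).getD ""),
       pvOrD st.2 (((pvCand tags).find? pvExP).getD "")) := by
  induction tags with
  | nil =>
    intro st
    simp only [List.foldl_nil, pvCand, List.map_nil, List.filterMap_nil, List.find?_nil,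
      Option.getD_none, pvOrD_empty_right]
  | cons t ts ih =>
    intro st
    rw [List.foldl_cons]
    cases hp : pvParseSourceTag t with
    | none =>
      have hc : pvCand (t :: ts) = pvCand ts := by
        simp only [pvCand, List.map_cons, List.filterMap_cons, hp, id_eq]
      rw [pvStep_parse_none st t hp, hc]
      exact ih st
    | some v =>
      have hv : v ≠ "" := pvParse_ne_empty t v hp
      have hc : pvCand (t :: ts) = v :: pvCand ts := by
        simp only [pvCand, List.map_cons, List.filterMap_cons, hp, id_eq]
      rw [pvStep_parse_some st t v hp, hc]
      by_cases hx : pvExP v = true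
      · have hehv : pvEhP v = false := by
          simp only [pvEhP, pvExP] at hx ⊢
          simp only [hx, Bool.not_true, Bool.and_false]
        rw [if_pos hx, List.find?_cons_of_pos (p := pvExP) hx, List.find?_cons_of_neg (p := pvEhP) (by rw [hehv]; exact Bool.false_ne_true),
            ih (st.1, pvOrD st.2 v), Option.getD_some,
            pvOrD_absorb st.2 v (((pvCand ts).find? pvExP).getD "") hv]
      · have hxf : pvExP v = false := by simpa using hx
        rw [if_neg hx, List.find?_cons_of_neg (p := pvExP) (by rw [hxf]; exact Bool.false_ne_true)]
        by_cases hh : PySem.Str.isIn "e-hentai.org" v = true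
        · have hehv : pvEhP v = true := by
            have hxf' := hxf
            simp only [pvExP] at hxf'
            simp only [pvEhP, hh, hxf', Bool.not_false, Bool.and_self]
          rw [if_pos hh, List.find?_cons_of_pos (p := pvEhP) hehv, ih (pvOrD st.1 v, st.2),
              Option.getD_some,
              pvOrD_absorb st.1 v (((pvCand ts).find? pvEhP).getD "") hv]
        · have hehv : pvEhP v = false := by
            have hhf : PySem.Str.isIn "e-hentai.org" v = false := by simpa using hh
            simp only [pvEhP, hhf, Bool.false_and]
          rw [if_neg hh, List.find?_cons_of_neg (p := pvEhP) (by rw [hehv]; exact Bool.false_ne_true)]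
          exact ih st

-- ===== VERDICT (by name: the statement is the Claim_ definition above) =====
theorem extract_source_urls_py_spec : Claim_equal_extract_source_urls_py := by
  intro tags _
  show extract_source_urls_py tags = extract_source_urls_py_alt tags
  simp only [extract_source_urls_py, extract_source_urls_py_alt]
  rw [pvLoop_char tags ("", "")]
  simp only [pvOrD_empty_left]
  rfl
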